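-- pv_equiv track=rewrite | github.com/critBus/IAEstadosDeMaduracion | Aplicacion/ReneIAClasificador/entrenador_v2_0.py | crearMatrizDeConfusionBidimencionalDeUnaClase
-- ===== SOURCE A (Python) =====
-- def crearMatrizDeConfusionBidimencionalDeUnaClase(matrizDeConfusionMulticlase,indiceDeClase):
--     """
--     [[Negativos Reales TN,Falsos Positivos FP],[ Falsos Negativos FN , Positivos Reales TP ]]
--     :param matrizDeConfusionMulticlase:
--     :param indiceDeClase:
--     :return:
--     """
--     FP=0
--     TP=0
--     FN=0
--     TN=0
--     for f in range(len(matrizDeConfusionMulticlase)):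
--         fila=matrizDeConfusionMulticlase[f]
--         for c in range(len(fila)):
--             valor=fila[c]
--             if c==indiceDeClase and f ==indiceDeClase:
--                 TP+=valor
--             elif c==indiceDeClase and f!=indiceDeClase:
--                 FP+=valor
--             elif f==indiceDeClase and c!=indiceDeClase:
--                 FN+=valor
--             else:
--                 TN+=valor
--     return [[TN,FP],[FN,TP]]
-- ===== SOURCE B (Python) =====
-- def crearMatrizDeConfusionBidimencionalDeUnaClase(matrizDeConfusionMulticlase, indiceDeClase):
--     total = 0
--     col = 0
--     for fila in matrizDeConfusionMulticlase:
--         total += sum(fila)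
--         if 0 <= indiceDeClase < len(fila):
--             col += fila[indiceDeClase]
--     if 0 <= indiceDeClase < len(matrizDeConfusionMulticlase):
--         filaClase = matrizDeConfusionMulticlase[indiceDeClase]
--         row = sum(filaClase)
--         tp = filaClase[indiceDeClase] if indiceDeClase < len(filaClase) else 0
--     else:
--         row = 0
--         tp = 0
--     return [[total - col - row + tp, col - tp], [row - tp, tp]]
-- ===== Notes on version B (the rewrite author's own statement) =====
-- stated objective: alternative
-- what changed: Replaces A's per-cell four-way if/elif classification inside nested index loops by a single pass accumulating the grand total and the class-column marginal, plus direct guarded reads of the class row sum and the diagonal cell, deriving FP/FN/TN by marginal arithmetic.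
import Mathlib
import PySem

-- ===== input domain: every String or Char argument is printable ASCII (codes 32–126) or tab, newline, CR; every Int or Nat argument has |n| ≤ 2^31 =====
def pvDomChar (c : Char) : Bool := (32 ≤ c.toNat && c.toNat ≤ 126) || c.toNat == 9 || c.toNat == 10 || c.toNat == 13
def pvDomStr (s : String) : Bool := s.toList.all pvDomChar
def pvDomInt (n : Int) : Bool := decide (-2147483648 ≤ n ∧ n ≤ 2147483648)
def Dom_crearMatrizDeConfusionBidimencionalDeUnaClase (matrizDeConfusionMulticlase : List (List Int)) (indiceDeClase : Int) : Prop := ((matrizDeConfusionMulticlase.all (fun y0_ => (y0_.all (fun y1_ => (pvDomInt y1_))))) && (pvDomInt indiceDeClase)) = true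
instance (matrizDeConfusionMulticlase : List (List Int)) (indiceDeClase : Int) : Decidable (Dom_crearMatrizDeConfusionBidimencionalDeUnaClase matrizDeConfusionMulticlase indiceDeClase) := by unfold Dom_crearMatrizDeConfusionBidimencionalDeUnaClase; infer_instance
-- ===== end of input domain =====

-- B replaces A's per-cell four-way classification by a single pass computing the grand
-- total and the class-column marginal, plus direct reads of the class row and diagonal
-- cell; the four counts fall out by marginal arithmetic (objective: alternative).

-- ===== PORT A =====
-- one step of A's inner loop body: state = ((FP, TP, FN, TN), column counter c)
def pvStepA (i : Int) (f : Nat) (p : (Int × Int × Int × Int) × Nat) (valor : Int) : (Int × Int × Int × Int) × Nat :=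
  match p with
  | ((FP, TP, FN, TN), c) =>
    (if (c : Int) = i ∧ (f : Int) = i then (FP, TP + valor, FN, TN)
     else if (c : Int) = i ∧ (f : Int) ≠ i then (FP + valor, TP, FN, TN)
     else if (f : Int) = i ∧ (c : Int) ≠ i then (FP, TP, FN + valor, TN)
     else (FP, TP, FN, TN + valor), c + 1)

-- A's inner loop: 'for c in range(len(fila))' over one row with row index f
def pvInnerA (i : Int) (f : Nat) (fila : List Int) (st : Int × Int × Int × Int) : Int × Int × Int × Int :=
  (fila.foldl (pvStepA i f) (st, 0)).1

def crearMatrizDeConfusionBidimencionalDeUnaClase (matrizDeConfusionMulticlase : List (List Int)) (indiceDeClase : Int) : List (List Int) :=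
  let st := (matrizDeConfusionMulticlase.foldl
      (fun (p : (Int × Int × Int × Int) × Nat) fila => (pvInnerA indiceDeClase p.2 fila p.1, p.2 + 1))
      ((0, 0, 0, 0), 0)).1
  [[st.2.2.2, st.1], [st.2.2.1, st.2.1]]

-- ===== PORT B =====
def crearMatrizDeConfusionBidimencionalDeUnaClase_alt (matrizDeConfusionMulticlase : List (List Int)) (indiceDeClase : Int) : List (List Int) :=
  let tc := matrizDeConfusionMulticlase.foldl
      (fun (p : Int × Int) fila =>
        (p.1 + fila.sum,
         if 0 ≤ indiceDeClase ∧ indiceDeClase < (fila.length : Int) then p.2 + fila.getD indiceDeClase.toNat 0 else p.2))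
      (0, 0)
  let rt : Int × Int :=
    if 0 ≤ indiceDeClase ∧ indiceDeClase < (matrizDeConfusionMulticlase.length : Int) then
      let filaClase := matrizDeConfusionMulticlase.getD indiceDeClase.toNat []
      (filaClase.sum,
       if indiceDeClase < (filaClase.length : Int) then filaClase.getD indiceDeClase.toNat 0 else 0)
    else (0, 0)
  [[tc.1 - tc.2 - rt.1 + rt.2, tc.2 - rt.2], [rt.1 - rt.2, rt.2]]

-- ===== PRECONDITION & SPEC =====
def Spec_crearMatrizDeConfusionBidimencionalDeUnaClase (matrizDeConfusionMulticlase : List (List Int)) (indiceDeClase : Int) (out : List (List Int)) : Prop := out = crearMatrizDeConfusionBidimencionalDeUnaClase_alt matrizDeConfusionMulticlase indiceDeClase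
instance (matrizDeConfusionMulticlase : List (List Int)) (indiceDeClase : Int) (out : List (List Int)) : Decidable (Spec_crearMatrizDeConfusionBidimencionalDeUnaClase matrizDeConfusionMulticlase indiceDeClase out) := by unfold Spec_crearMatrizDeConfusionBidimencionalDeUnaClase; infer_instance

-- ===== CLAIM (what is proved, stated in full; the proofs are below) =====
def Claim_equal_crearMatrizDeConfusionBidimencionalDeUnaClase : Prop := ∀ (matrizDeConfusionMulticlase : List (List Int)) (indiceDeClase : Int), Dom_crearMatrizDeConfusionBidimencionalDeUnaClase matrizDeConfusionMulticlase indiceDeClase → Spec_crearMatrizDeConfusionBidimencionalDeUnaClase matrizDeConfusionMulticlase indiceDeClase (crearMatrizDeConfusionBidimencionalDeUnaClase matrizDeConfusionMulticlase indiceDeClase)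

-- ===== LEMMAS AND PROOFS =====

-- the element of xs sitting at (Int) position i when positions are counted from offset k, else 0
def pickFrom (i : Int) (k : Nat) : List Int → Int
  | [] => 0
  | v :: r => (if (k : Int) = i then v else 0) + pickFrom i (k + 1) r

theorem pickFrom_eq (i : Int) (k : Nat) (r : List Int) :
    pickFrom i k r = if (k : Int) ≤ i ∧ i < (k : Int) + r.length then r.getD (i - k).toNat 0 else 0 := by
  induction r generalizing k with
  | nil => simp [pickFrom]
  | cons v r ih =>
    rw [pickFrom, ih (k + 1)]
    by_cases h : (k : Int) = i
    · rw [if_pos h, if_neg (by push_cast; omega), if_pos (by simp; omega)]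
      have h0 : (i - k).toNat = 0 := by omega
      rw [h0, List.getD_cons_zero]; ring
    · rw [if_neg h]
      by_cases h2 : (k : Int) + 1 ≤ i ∧ i < (k : Int) + 1 + r.length
      · rw [if_pos (by omega), if_pos (by simp; omega), zero_add]
        have h4 : (i - (k : Nat)).toNat = (i - ((k + 1 : Nat) : Int)).toNat + 1 := by push_cast; omega
        rw [h4, List.getD_cons_succ]
      · rw [if_neg (by push_cast at h2 ⊢; omega), if_neg (by simp at h2 ⊢; push_cast at h2 ⊢; omega)]
        ring

theorem innerA_fold (i : Int) (f : Nat) (r : List Int) (k : Nat) (FP TP FN TN : Int) :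
    r.foldl (pvStepA i f) ((FP, TP, FN, TN), k) =
      ((if (f : Int) = i then (FP, TP + pickFrom i k r, FN + (r.sum - pickFrom i k r), TN)
        else (FP + pickFrom i k r, TP, FN, TN + (r.sum - pickFrom i k r))), k + r.length) := by
  induction r generalizing k FP TP FN TN with
  | nil => by_cases hf : (f : Int) = i <;> simp [pickFrom, hf]
  | cons v r ih =>
    rw [List.foldl_cons]
    by_cases hf : (f : Int) = i <;> by_cases hc : (k : Int) = i
    · rw [show pvStepA i f ((FP, TP, FN, TN), k) v = ((FP, TP + v, FN, TN), k + 1) from by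
        simp [pvStepA, hf, hc]]
      rw [ih, if_pos hf, if_pos hf]
      simp only [pickFrom, List.sum_cons, List.length_cons, if_pos hc]
      exact congrArg₂ Prod.mk
        (congrArg₂ Prod.mk rfl (congrArg₂ Prod.mk (by ring) (congrArg₂ Prod.mk (by ring) rfl)))
        (by omega)
    · rw [show pvStepA i f ((FP, TP, FN, TN), k) v = ((FP, TP, FN + v, TN), k + 1) from by
        simp [pvStepA, hf, hc]]
      rw [ih, if_pos hf, if_pos hf]
      simp only [pickFrom, List.sum_cons, List.length_cons, if_neg hc]
      exact congrArg₂ Prod.mk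
        (congrArg₂ Prod.mk rfl (congrArg₂ Prod.mk (by ring) (congrArg₂ Prod.mk (by ring) rfl)))
        (by omega)
    · rw [show pvStepA i f ((FP, TP, FN, TN), k) v = ((FP + v, TP, FN, TN), k + 1) from by
        simp [pvStepA, hf, hc]]
      rw [ih, if_neg hf, if_neg hf]
      simp only [pickFrom, List.sum_cons, List.length_cons, if_pos hc]
      exact congrArg₂ Prod.mk
        (congrArg₂ Prod.mk (by ring) (congrArg₂ Prod.mk rfl (congrArg₂ Prod.mk rfl (by ring))))
        (by omega)
    · rw [show pvStepA i f ((FP, TP, FN, TN), k) v = ((FP, TP, FN, TN + v), k + 1) from by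
        simp [pvStepA, hf, hc]]
      rw [ih, if_neg hf, if_neg hf]
      simp only [pickFrom, List.sum_cons, List.length_cons, if_neg hc]
      exact congrArg₂ Prod.mk
        (congrArg₂ Prod.mk (by ring) (congrArg₂ Prod.mk rfl (congrArg₂ Prod.mk rfl (by ring))))
        (by omega)

theorem outerA_fold (i : Int) (M : List (List Int)) (k : Nat) (FP TP FN TN : Int) :
    (M.foldl (fun (p : (Int × Int × Int × Int) × Nat) fila => (pvInnerA i p.2 fila p.1, p.2 + 1))
        ((FP, TP, FN, TN), k)) =
      ((FP + ((M.map (fun r => pickFrom i 0 r)).sum - pickFrom i k (M.map (fun r => pickFrom i 0 r))),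
        TP + pickFrom i k (M.map (fun r => pickFrom i 0 r)),
        FN + (pickFrom i k (M.map List.sum) - pickFrom i k (M.map (fun r => pickFrom i 0 r))),
        TN + ((M.map List.sum).sum - (M.map (fun r => pickFrom i 0 r)).sum
               - pickFrom i k (M.map List.sum) + pickFrom i k (M.map (fun r => pickFrom i 0 r)))),
       k + M.length) := by
  induction M generalizing k FP TP FN TN with
  | nil => simp [pickFrom]
  | cons r M ih =>
    rw [List.foldl_cons]
    have hin : pvInnerA i k r (FP, TP, FN, TN) =
        (if (k : Int) = i then (FP, TP + pickFrom i 0 r, FN + (r.sum - pickFrom i 0 r), TN)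
         else (FP + pickFrom i 0 r, TP, FN, TN + (r.sum - pickFrom i 0 r))) := by
      unfold pvInnerA; rw [innerA_fold]
    by_cases hk : (k : Int) = i
    · dsimp only
      rw [hin, if_pos hk, ih]
      simp only [List.map_cons, List.sum_cons, List.length_cons, pickFrom, if_pos hk]
      exact congrArg₂ Prod.mk
        (congrArg₂ Prod.mk (by ring) (congrArg₂ Prod.mk (by ring) (congrArg₂ Prod.mk (by ring) (by ring))))
        (by omega)
    · dsimp only
      rw [hin, if_neg hk, ih]
      simp only [List.map_cons, List.sum_cons, List.length_cons, pickFrom, if_neg hk]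
      exact congrArg₂ Prod.mk
        (congrArg₂ Prod.mk (by ring) (congrArg₂ Prod.mk (by ring) (congrArg₂ Prod.mk (by ring) (by ring))))
        (by omega)

theorem tc_fold (i : Int) (M : List (List Int)) (t c : Int) :
    M.foldl (fun (p : Int × Int) fila =>
        (p.1 + fila.sum,
         if 0 ≤ i ∧ i < (fila.length : Int) then p.2 + fila.getD i.toNat 0 else p.2)) (t, c) =
      (t + (M.map List.sum).sum, c + (M.map (fun r => pickFrom i 0 r)).sum) := by
  induction M generalizing t c with
  | nil => simp
  | cons r M ih =>
    rw [List.foldl_cons]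
    have hpick : pickFrom i 0 r = if 0 ≤ i ∧ i < (r.length : Int) then r.getD i.toNat 0 else 0 := by
      rw [pickFrom_eq]; norm_num
    by_cases h : 0 ≤ i ∧ i < (r.length : Int)
    · dsimp only
      rw [if_pos h, ih]
      simp only [List.map_cons, List.sum_cons, hpick, if_pos h]
      exact congrArg₂ Prod.mk (by ring) (by ring)
    · dsimp only
      rw [if_neg h, ih]
      simp only [List.map_cons, List.sum_cons, hpick, if_neg h]
      exact congrArg₂ Prod.mk (by ring) (by ring)

theorem pick_map (i : Int) (M : List (List Int)) (g : List Int → Int) :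
    pickFrom i 0 (M.map g) =
      if 0 ≤ i ∧ i < (M.length : Int) then g (M.getD i.toNat []) else 0 := by
  rw [pickFrom_eq]
  by_cases h : 0 ≤ i ∧ i < (M.length : Int)
  · have hlt : i.toNat < M.length := by omega
    rw [if_pos (by simp; omega), if_pos h]
    have h0 : (i - ((0 : Nat) : Int)).toNat = i.toNat := by omega
    rw [h0, List.getD_eq_getElem _ _ (by simpa using hlt), List.getD_eq_getElem _ _ hlt]
    simp
  · rw [if_neg (by simp at h ⊢; omega), if_neg h]

-- ===== VERDICT (by name: the statement is the Claim_ definition above) =====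
theorem crearMatrizDeConfusionBidimencionalDeUnaClase_spec : Claim_equal_crearMatrizDeConfusionBidimencionalDeUnaClase := by
  intro M i _
  show _ = _
  unfold crearMatrizDeConfusionBidimencionalDeUnaClase crearMatrizDeConfusionBidimencionalDeUnaClase_alt
  rw [outerA_fold, tc_fold]
  rw [pick_map i M (fun r => pickFrom i 0 r), pick_map i M List.sum]
  dsimp only
  by_cases h : 0 ≤ i ∧ i < (M.length : Int)
  · have hpick : pickFrom i 0 (M.getD i.toNat []) =
        if 0 ≤ i ∧ i < ((M.getD i.toNat []).length : Int) then (M.getD i.toNat []).getD i.toNat 0 else 0 := by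
      rw [pickFrom_eq]; norm_num
    rw [if_pos h, if_pos h, if_pos h, hpick]
    dsimp only
    by_cases h2 : i < ((M.getD i.toNat []).length : Int)
    · rw [if_pos ⟨h.1, h2⟩, if_pos h2]
      exact congrArg₂ List.cons
        (congrArg₂ List.cons (by ring) (congrArg₂ List.cons (by ring) rfl))
        (congrArg₂ List.cons
          (congrArg₂ List.cons (by ring) (congrArg₂ List.cons (by ring) rfl)) rfl)
    · rw [if_neg (fun hh => h2 hh.2), if_neg h2]
      exact congrArg₂ List.cons
        (congrArg₂ List.cons (by ring) (congrArg₂ List.cons (by ring) rfl))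
        (congrArg₂ List.cons
          (congrArg₂ List.cons (by ring) (congrArg₂ List.cons (by ring) rfl)) rfl)
  · rw [if_neg h, if_neg h, if_neg h]
    dsimp only
    exact congrArg₂ List.cons
      (congrArg₂ List.cons (by ring) (congrArg₂ List.cons (by ring) rfl))
      (congrArg₂ List.cons
        (congrArg₂ List.cons (by ring) (congrArg₂ List.cons (by ring) rfl)) rfl)
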